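-- pv_equiv track=rewrite | github.com/myxu95/Immunex | immunex/analysis/topology/cdr_manager.py | _parse_anarci_numbering
-- ===== SOURCE A (Python) =====
-- from typing import Dict, List, Optional, Tuple, Any
--
-- def _parse_anarci_numbering(numbering: List, alignment_details: Any) -> Dict:
--     """
--     Parse ANARCI numbering to extract CDR regions.
--
--     IMGT CDR definitions:
--     - CDR1: 27-38
--     - CDR2: 56-65
--     - CDR3: 105-117
--
--     Args:
--         numbering: List of ((position, insertion), amino_acid) tuples
--         alignment_details: Not used (kept for compatibility)
--     """
--     cdr_regions = {}
--
--     # Extract positions from numbering.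
--     # numbering format: [((pos, insertion), amino_acid), ...]
--     #
--     # IMPORTANT:
--     # The numbering list can include alignment gaps. The enumerate index is
--     # therefore NOT guaranteed to match the ungapped sequence index. We must
--     # track the original sequence index by incrementing only when ANARCI
--     # emits a real amino acid.
--     positions = []
--     seq_idx = 0
--     for item in numbering:
--         if isinstance(item, tuple) and len(item) == 2:
--             pos_info, aa = item
--             if isinstance(pos_info, tuple) and len(pos_info) == 2:
--                 pos, insertion = pos_info
--                 if pos is not None and aa != '-':  # Skip gaps
--                     positions.append((seq_idx, pos, insertion))
--                     seq_idx += 1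
--
--     if not positions:
--         return cdr_regions
--
--     # IMGT CDR ranges
--     imgt_cdr_ranges = {
--         'cdr1': (27, 38),
--         'cdr2': (56, 65),
--         'cdr3': (105, 117)
--     }
--
--     for cdr_name, (start_pos, end_pos) in imgt_cdr_ranges.items():
--         # Find sequence indices corresponding to IMGT positions
--         indices = [
--             seq_i for seq_i, pos, ins in positions
--             if start_pos <= pos <= end_pos
--         ]
--         if indices:
--             # Return as (start_index, end_index) in original sequence
--             cdr_regions[cdr_name] = (min(indices), max(indices) + 1)
--
--     return cdr_regions
-- ===== SOURCE B (Python) =====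
-- # B: one streaming pass; tracks first/last matching sequence index per CDR range
-- # instead of building a positions list and rescanning it three times.
-- _RANGES = (('cdr1', 27, 38), ('cdr2', 56, 65), ('cdr3', 105, 117))
--
-- def _parse_anarci_numbering(numbering, alignment_details):
--     bounds = {name: None for name, _, _ in _RANGES}
--     seq_idx = 0
--     for item in numbering:
--         if isinstance(item, tuple) and len(item) == 2:
--             pos_info, aa = item
--             if isinstance(pos_info, tuple) and len(pos_info) == 2:
--                 pos = pos_info[0]
--                 if pos is not None and aa != '-':
--                     for name, lo, hi in _RANGES:
--                         if lo <= pos <= hi: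
--                             cur = bounds[name]
--                             bounds[name] = (seq_idx if cur is None else cur[0], seq_idx)
--                     seq_idx += 1
--     return {name: (b[0], b[1] + 1) for name, b in bounds.items() if b is not None}
-- ===== Notes on version B (the rewrite author's own statement) =====
-- stated objective: simpler
-- what changed: B does one streaming pass that tracks the first/last sequence index per IMGT CDR range directly, instead of A's intermediate positions list followed by three separate filter-and-min/max rescans.
import Mathlib
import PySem

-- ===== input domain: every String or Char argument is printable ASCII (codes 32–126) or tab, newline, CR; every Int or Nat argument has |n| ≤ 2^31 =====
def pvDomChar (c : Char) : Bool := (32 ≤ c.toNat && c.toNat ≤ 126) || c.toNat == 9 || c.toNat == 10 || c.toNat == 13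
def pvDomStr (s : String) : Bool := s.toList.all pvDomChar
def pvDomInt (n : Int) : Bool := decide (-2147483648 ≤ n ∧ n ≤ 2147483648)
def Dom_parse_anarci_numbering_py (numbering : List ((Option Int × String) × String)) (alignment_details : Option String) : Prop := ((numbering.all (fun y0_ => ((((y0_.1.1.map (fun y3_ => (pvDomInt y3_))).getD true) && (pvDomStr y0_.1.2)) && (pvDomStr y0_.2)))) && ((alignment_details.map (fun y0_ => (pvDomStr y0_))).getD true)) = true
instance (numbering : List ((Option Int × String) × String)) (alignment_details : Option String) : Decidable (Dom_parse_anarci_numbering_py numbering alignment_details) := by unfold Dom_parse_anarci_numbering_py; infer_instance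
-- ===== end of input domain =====

-- B (one streaming pass keeping first/last index per CDR range) replaces A's
-- positions list plus three filter-and-min/max rescans; objective: simpler.

-- ===== PORT A =====
-- one loop step of A: isinstance/len checks are always true under the type convention
def pvAStep (st : List (Int × Int × String) × Int) (item : (Option Int × String) × String) :
    List (Int × Int × String) × Int :=
  match item with
  | ((some p, ins), aa) => if aa ≠ "-" then (st.1 ++ [(st.2, p, ins)], st.2 + 1) else st
  | ((none, _), _) => st

def parse_anarci_numbering_py (numbering : List ((Option Int × String) × String)) (alignment_details : Option String) : List (String × Int × Int) :=
  let positions := (numbering.foldl pvAStep ([], 0)).1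
  if positions = [] then []
  else
    [("cdr1", ((27 : Int), (38 : Int))), ("cdr2", (56, 65)), ("cdr3", (105, 117))].foldl
      (fun out r =>
        let indices := (positions.filter
          (fun t => decide (r.2.1 ≤ t.2.1) && decide (t.2.1 ≤ r.2.2))).map (·.1)
        out ++
          match PySem.List.min? indices (fun y => y), PySem.List.max? indices (fun y => y) with
          | some mn, some mx => [(r.1, mn, mx + 1)]
          | _, _ => []) []

-- ===== PORT B =====
def pvUpd (lo hi p i : Int) (o : Option (Int × Int)) : Option (Int × Int) :=
  if lo ≤ p ∧ p ≤ hi then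
    match o with
    | none => some (i, i)
    | some (f, _) => some (f, i)
  else o

def pvBStep (st : Int × Option (Int × Int) × Option (Int × Int) × Option (Int × Int))
    (item : (Option Int × String) × String) :
    Int × Option (Int × Int) × Option (Int × Int) × Option (Int × Int) :=
  match item with
  | ((some p, _), aa) =>
    if aa ≠ "-" then
      (st.1 + 1, pvUpd 27 38 p st.1 st.2.1, pvUpd 56 65 p st.1 st.2.2.1,
        pvUpd 105 117 p st.1 st.2.2.2)
    else st
  | ((none, _), _) => st

def pvEmit (name : String) (o : Option (Int × Int)) : List (String × Int × Int) :=
  match o with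
  | some (f, l) => [(name, f, l + 1)]
  | none => []

def parse_anarci_numbering_py_alt (numbering : List ((Option Int × String) × String)) (alignment_details : Option String) : List (String × Int × Int) :=
  let st := numbering.foldl pvBStep (0, none, none, none)
  pvEmit "cdr1" st.2.1 ++ pvEmit "cdr2" st.2.2.1 ++ pvEmit "cdr3" st.2.2.2

-- ===== PRECONDITION & SPEC =====
def Spec_parse_anarci_numbering_py (numbering : List ((Option Int × String) × String)) (alignment_details : Option String) (out : List (String × Int × Int)) : Prop := out = parse_anarci_numbering_py_alt numbering alignment_details
instance (numbering : List ((Option Int × String) × String)) (alignment_details : Option String) (out : List (String × Int × Int)) : Decidable (Spec_parse_anarci_numbering_py numbering alignment_details out) := by unfold Spec_parse_anarci_numbering_py; infer_instance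

-- ===== CLAIM (what is proved, stated in full; the proofs are below) =====
def Claim_equal_parse_anarci_numbering_py : Prop := ∀ (numbering : List ((Option Int × String) × String)) (alignment_details : Option String), Dom_parse_anarci_numbering_py numbering alignment_details → Spec_parse_anarci_numbering_py numbering alignment_details (parse_anarci_numbering_py numbering alignment_details)

-- ===== LEMMAS AND PROOFS =====

-- the ungapped residue list with its sequence indices, starting at index i
def pvPf (i : Int) : List ((Option Int × String) × String) → List (Int × Int × String)
  | [] => []
  | ((some p, ins), aa) :: rest =>
      if aa ≠ "-" then (i, p, ins) :: pvPf (i + 1) rest else pvPf i rest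
  | ((none, _), _) :: rest => pvPf i rest

def pvIdxs (lo hi : Int) (ps : List (Int × Int × String)) : List Int :=
  (ps.filter (fun t => decide (lo ≤ t.2.1) && decide (t.2.1 ≤ hi))).map (·.1)

def pvFr (lo hi : Int) (ps : List (Int × Int × String)) (o : Option (Int × Int)) :
    Option (Int × Int) :=
  ps.foldl (fun o t => pvUpd lo hi t.2.1 t.1 o) o

theorem pvAStep_foldl : ∀ (nb : List ((Option Int × String) × String))
    (acc : List (Int × Int × String)) (i : Int),
    nb.foldl pvAStep (acc, i) = (acc ++ pvPf i nb, i + (pvPf i nb).length) := by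
  intro nb
  induction nb with
  | nil => intro acc i; simp [pvPf]
  | cons x rest ih =>
    intro acc i
    obtain ⟨⟨p?, ins⟩, aa⟩ := x
    cases p? with
    | none => simp [pvAStep, pvPf, ih]
    | some p =>
      by_cases h : aa = "-"
      · simp [pvAStep, pvPf, h, ih]
      · simp only [List.foldl_cons, pvAStep, pvPf, if_pos (by exact h)]
        rw [ih, Prod.mk.injEq]
        refine ⟨by simp, ?_⟩
        simp only [List.length_cons]
        push_cast; ring

theorem pvBStep_foldl : ∀ (nb : List ((Option Int × String) × String)) (i : Int)
    (o1 o2 o3 : Option (Int × Int)),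
    nb.foldl pvBStep (i, o1, o2, o3) =
      (i + (pvPf i nb).length, pvFr 27 38 (pvPf i nb) o1, pvFr 56 65 (pvPf i nb) o2,
        pvFr 105 117 (pvPf i nb) o3) := by
  intro nb
  induction nb with
  | nil => intro i o1 o2 o3; simp [pvPf, pvFr]
  | cons x rest ih =>
    intro i o1 o2 o3
    obtain ⟨⟨p?, ins⟩, aa⟩ := x
    cases p? with
    | none => simp [pvBStep, pvPf, pvFr, ih]
    | some p =>
      by_cases h : aa = "-"
      · simp [pvBStep, pvPf, pvFr, h, ih]
      · simp only [List.foldl_cons, pvBStep, pvPf, if_pos (by exact h)]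
        rw [ih, Prod.mk.injEq]
        refine ⟨?_, rfl⟩
        simp only [List.length_cons]
        push_cast; ring

theorem getLast?_getD_cons (a l : Int) (xs : List Int) :
    ((a :: xs).getLast?.getD l) = xs.getLast?.getD a := by
  cases xs with
  | nil => simp
  | cons y ys =>
    obtain ⟨m, hm⟩ := Option.isSome_iff_exists.mp
      (List.getLast?_isSome.mpr (List.cons_ne_nil y ys))
    rw [List.getLast?_cons_cons, hm]
    simp

theorem pvFr_some (lo hi : Int) : ∀ (ps : List (Int × Int × String)) (f l : Int),
    pvFr lo hi ps (some (f, l)) = some (f, (pvIdxs lo hi ps).getLast?.getD l) := by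
  intro ps
  induction ps with
  | nil => intro f l; simp [pvFr, pvIdxs]
  | cons t rest ih =>
    intro f l
    rw [show pvFr lo hi (t :: rest) (some (f, l)) =
      pvFr lo hi rest (pvUpd lo hi t.2.1 t.1 (some (f, l))) from rfl]
    by_cases h : lo ≤ t.2.1 ∧ t.2.1 ≤ hi
    · rw [show pvUpd lo hi t.2.1 t.1 (some (f, l)) = some (f, t.1) by
        simp [pvUpd, if_pos h], ih]
      have : pvIdxs lo hi (t :: rest) = t.1 :: pvIdxs lo hi rest := by
        simp [pvIdxs, h.1, h.2]
      rw [this, getLast?_getD_cons]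
    · rw [show pvUpd lo hi t.2.1 t.1 (some (f, l)) = some (f, l) by
        simp [pvUpd, if_neg h], ih]
      have : pvIdxs lo hi (t :: rest) = pvIdxs lo hi rest := by
        simp only [pvIdxs, List.filter_cons]
        rw [if_neg (by simpa using h)]
      rw [this]

theorem pvFr_none (lo hi : Int) : ∀ (ps : List (Int × Int × String)),
    pvFr lo hi ps none =
      match (pvIdxs lo hi ps).head? with
      | none => none
      | some j => some (j, (pvIdxs lo hi ps).getLast?.getD j) := by
  intro ps
  induction ps with
  | nil => simp [pvFr, pvIdxs]
  | cons t rest ih =>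
    rw [show pvFr lo hi (t :: rest) none =
      pvFr lo hi rest (pvUpd lo hi t.2.1 t.1 none) from rfl]
    by_cases h : lo ≤ t.2.1 ∧ t.2.1 ≤ hi
    · rw [show pvUpd lo hi t.2.1 t.1 none = some (t.1, t.1) by
        simp [pvUpd, if_pos h], pvFr_some]
      have : pvIdxs lo hi (t :: rest) = t.1 :: pvIdxs lo hi rest := by
        simp [pvIdxs, h.1, h.2]
      rw [this]
      simp only [List.head?_cons]
      rw [getLast?_getD_cons]
    · rw [show pvUpd lo hi t.2.1 t.1 none = none by simp [pvUpd, if_neg h], ih]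
      have : pvIdxs lo hi (t :: rest) = pvIdxs lo hi rest := by
        simp only [pvIdxs, List.filter_cons]
        rw [if_neg (by simpa using h)]
      rw [this]

-- indices in pvPf are strictly increasing
theorem pvPf_lb : ∀ (nb : List ((Option Int × String) × String)) (i : Int),
    ∀ t ∈ pvPf i nb, i ≤ t.1 := by
  intro nb
  induction nb with
  | nil => intro i t ht; simp [pvPf] at ht
  | cons x rest ih =>
    intro i t ht
    obtain ⟨⟨p?, ins⟩, aa⟩ := x
    cases p? with
    | none => exact ih i t (by simpa [pvPf] using ht)
    | some p =>
      by_cases h : aa = "-"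
      · exact ih i t (by simpa [pvPf, h] using ht)
      · simp only [pvPf, if_pos (by exact h)] at ht
        rw [List.mem_cons] at ht
        rcases ht with ht | ht
        · simp [ht]
        · have := ih (i + 1) t ht; omega

theorem pvPf_chain : ∀ (nb : List ((Option Int × String) × String)) (i : Int),
    (pvPf i nb).Pairwise (fun a b => a.1 < b.1) := by
  intro nb
  induction nb with
  | nil => intro i; simp [pvPf]
  | cons x rest ih =>
    intro i
    obtain ⟨⟨p?, ins⟩, aa⟩ := x
    cases p? with
    | none => simpa [pvPf] using ih i
    | some p =>
      by_cases h : aa = "-"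
      · simpa [pvPf, h] using ih i
      · simp only [pvPf, if_pos (by exact h)]
        refine List.pairwise_cons.mpr ⟨?_, ih (i + 1)⟩
        intro b hb
        have := pvPf_lb rest (i + 1) b hb
        simpa using by omega

theorem min_max_chain : ∀ (l : List Int), l.Pairwise (· < ·) →
    PySem.List.min? l (fun y => y) = l.head? ∧
    PySem.List.max? l (fun y => y) = l.getLast? := by
  intro l hl
  constructor
  · cases l with
    | nil => simp [PySem.List.min?_eq_none_iff]
    | cons a t =>
      rw [PySem.List.min?_id_cons]
      have hlt : ∀ y ∈ t, a < y := (List.pairwise_cons.mp hl).1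
      have hle : t.foldl min a ≤ a := (PySem.List.foldl_min_le t a).1
      rcases PySem.List.foldl_min_mem t a with h | h
      · simp [h]
      · exact absurd hle (by have := hlt _ h; omega)
  · induction l with
    | nil => simp [PySem.List.max?_eq_none_iff]
    | cons a t ih =>
      cases t with
      | nil => rw [PySem.List.max?_id_cons]; simp
      | cons b s =>
        have hl' : (b :: s).Pairwise (· < ·) := (List.pairwise_cons.mp hl).2
        have hab : a < b := (List.pairwise_cons.mp hl).1 b (by simp)
        rw [PySem.List.max?_id_cons]
        have := ih hl'
        rw [PySem.List.max?_id_cons] at this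
        simp only [List.foldl_cons]
        rw [show max a b = b by omega]
        rw [this, List.getLast?_cons_cons]

-- A's per-range output equals B's pvEmit of the streamed bounds
theorem range_match (lo hi : Int) (name : String) (ps : List (Int × Int × String))
    (hc : ps.Pairwise (fun a b => a.1 < b.1)) :
    (match PySem.List.min? (pvIdxs lo hi ps) (fun y => y),
           PySem.List.max? (pvIdxs lo hi ps) (fun y => y) with
     | some mn, some mx => [(name, mn, mx + 1)]
     | _, _ => ([] : List (String × Int × Int))) = pvEmit name (pvFr lo hi ps none) := by
  have hchain : (pvIdxs lo hi ps).Pairwise (· < ·) := by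
    have hf : (ps.filter (fun t => decide (lo ≤ t.2.1) && decide (t.2.1 ≤ hi))).Pairwise
        (fun a b => a.1 < b.1) := List.Pairwise.sublist List.filter_sublist hc
    exact (List.pairwise_map).mpr hf
  obtain ⟨hmin, hmax⟩ := min_max_chain _ hchain
  rw [hmin, hmax, pvFr_none]
  cases hh : (pvIdxs lo hi ps).head? with
  | none =>
    simp [pvEmit]
  | some j =>
    have hne : pvIdxs lo hi ps ≠ [] := by intro h; rw [h] at hh; simp at hh
    obtain ⟨m, hm⟩ := Option.isSome_iff_exists.mp (List.getLast?_isSome.mpr hne)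
    simp [hm, pvEmit]

theorem main_eq (nb : List ((Option Int × String) × String)) (ad : Option String) :
    parse_anarci_numbering_py nb ad = parse_anarci_numbering_py_alt nb ad := by
  unfold parse_anarci_numbering_py parse_anarci_numbering_py_alt
  rw [pvAStep_foldl nb [] 0, pvBStep_foldl nb 0 none none none]
  simp only [List.nil_append]
  have hc := pvPf_chain nb 0
  by_cases h : pvPf 0 nb = []
  · simp [h, pvFr, pvEmit]
  · rw [if_neg h]
    have e1 := range_match 27 38 "cdr1" (pvPf 0 nb) hc
    have e2 := range_match 56 65 "cdr2" (pvPf 0 nb) hc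
    have e3 := range_match 105 117 "cdr3" (pvPf 0 nb) hc
    simp only [pvIdxs] at e1 e2 e3
    simp only [List.foldl_cons, List.foldl_nil, List.nil_append, List.append_assoc]
    rw [e1, e2, e3]

-- ===== VERDICT (by name: the statement is the Claim_ definition above) =====
theorem parse_anarci_numbering_py_spec : Claim_equal_parse_anarci_numbering_py := by
  intro nb ad _
  unfold Spec_parse_anarci_numbering_py
  exact main_eq nb ad
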